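-- pv_equiv track=rewrite | github.com/cppdocs/cppdocs | tools/ranges_categorizer.py | short_name_from_names
-- ===== SOURCE A (Python) =====
-- NAMESPACE_PREFIXES = (
--     "std::ranges::views::",
--     "std::views::",
--     "std::ranges::",
--     "std::",
-- )
--
-- def normalize_name(name: str) -> str:
--     out = name.strip()
--     for prefix in NAMESPACE_PREFIXES:
--         if out.startswith(prefix):
--             out = out[len(prefix) :]
--             break
--     return out.strip()
--
-- def short_name_from_names(names: list[str]) -> str | None:
--     for name in names:
--         if "::views::" in name:
--             return f"views::{normalize_name(name)}"
--     for name in names: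
--         if "::" in name:
--             return normalize_name(name)
--     return names[0] if names else None
-- ===== SOURCE B (Python) =====
-- NAMESPACE_PREFIXES = (
--     "std::ranges::views::",
--     "std::views::",
--     "std::ranges::",
--     "std::",
-- )
--
-- def normalize_name(name: str) -> str:
--     out = name.strip()
--     for prefix in NAMESPACE_PREFIXES:
--         if out.startswith(prefix):
--             out = out[len(prefix) :]
--             break
--     return out.strip()
--
-- def short_name_from_names(names: list[str]) -> str | None:
--     first_plain = None
--     for name in names:
--         if "::views::" in name:
--             return f"views::{normalize_name(name)}"
--         if first_plain is None and "::" in name: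
--             first_plain = name
--     if first_plain is not None:
--         return normalize_name(first_plain)
--     return names[0] if names else None
-- ===== Notes on version B (the rewrite author's own statement) =====
-- stated objective: simpler
-- what changed: B replaces A's two sequential scans of the list with a single loop that returns immediately on a '::views::' name and merely stashes the first plain '::' name for after the loop.
import Mathlib
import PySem

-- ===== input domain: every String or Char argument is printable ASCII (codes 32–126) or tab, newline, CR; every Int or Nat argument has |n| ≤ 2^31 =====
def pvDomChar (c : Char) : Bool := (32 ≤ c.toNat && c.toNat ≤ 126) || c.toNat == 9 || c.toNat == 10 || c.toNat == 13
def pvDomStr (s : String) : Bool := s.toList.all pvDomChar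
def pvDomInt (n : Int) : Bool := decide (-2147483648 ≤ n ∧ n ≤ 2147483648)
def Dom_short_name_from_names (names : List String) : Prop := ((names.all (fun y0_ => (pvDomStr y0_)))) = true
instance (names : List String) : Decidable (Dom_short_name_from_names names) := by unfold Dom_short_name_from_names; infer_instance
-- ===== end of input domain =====

-- B changes A's two sequential scans into a single loop that stashes the first plain '::' name; same results, simpler flow.

-- ===== PORT A =====
def pvNAMESPACE_PREFIXES : List String :=
  ["std::ranges::views::", "std::views::", "std::ranges::", "std::"]

-- 'for prefix in NAMESPACE_PREFIXES: if out.startswith(prefix): out = out[len(prefix):]; break'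
def pvStripPrefixLoop : List String → String → String
  | [], out => out
  | p :: ps, out =>
      if PySem.Str.startswith out p then PySem.Str.slice out (some (PySem.Str.len p)) none
      else pvStripPrefixLoop ps out

def normalize_name (name : String) : String :=
  PySem.Str.strip (pvStripPrefixLoop pvNAMESPACE_PREFIXES (PySem.Str.strip name))

-- first for-loop of A
def pvLoopViews : List String → Option String
  | [] => none
  | n :: rest =>
      if PySem.Str.isIn "::views::" n then some ("views::" ++ normalize_name n)
      else pvLoopViews rest

-- second for-loop of A
def pvLoopPlain : List String → Option String
  | [] => none
  | n :: rest =>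
      if PySem.Str.isIn "::" n then some (normalize_name n)
      else pvLoopPlain rest

def short_name_from_names (names : List String) : Option String :=
  match pvLoopViews names with
  | some r => some r
  | none =>
    match pvLoopPlain names with
    | some r => some r
    | none => names.head?   -- names[0] if names else None

-- ===== PORT B =====
-- single loop carrying the 'first_plain' stash; 'orig' is the Python closure over 'names'
def pvAltGo (orig : List String) : List String → Option String → Option String
  | [], fp =>
      match fp with
      | some n => some (normalize_name n)
      | none => orig.head?   -- names[0] if names else None
  | name :: rest, fp =>
      if PySem.Str.isIn "::views::" name then some ("views::" ++ normalize_name name)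
      else pvAltGo orig rest
        (if fp.isNone && PySem.Str.isIn "::" name then some name else fp)

def short_name_from_names_alt (names : List String) : Option String :=
  pvAltGo names names none

-- ===== PRECONDITION & SPEC =====
def Spec_short_name_from_names (names : List String) (out : Option String) : Prop := out = short_name_from_names_alt names
instance (names : List String) (out : Option String) : Decidable (Spec_short_name_from_names names out) := by unfold Spec_short_name_from_names; infer_instance

-- ===== CLAIM (what is proved, stated in full; the proofs are below) =====
def Claim_equal_short_name_from_names : Prop := ∀ (names : List String), Dom_short_name_from_names names → Spec_short_name_from_names names (short_name_from_names names)

-- ===== LEMMAS AND PROOFS =====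

theorem pvAltGo_eq (orig : List String) :
    ∀ (l : List String) (fp : Option String),
      pvAltGo orig l fp =
        match pvLoopViews l with
        | some r => some r
        | none =>
          match fp with
          | some n => some (normalize_name n)
          | none =>
            match pvLoopPlain l with
            | some r => some r
            | none => orig.head? := by
  intro l
  induction l with
  | nil => intro fp; cases fp <;> rfl
  | cons n rest ih =>
    intro fp
    simp only [pvAltGo, pvLoopViews, pvLoopPlain, ih, PySem.Str.isIn_eq]
    cases fp <;> split_ifs <;> simp_all
-- ===== VERDICT (by name: the statement is the Claim_ definition above) =====
theorem short_name_from_names_spec : Claim_equal_short_name_from_names := by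
  intro names _
  unfold Spec_short_name_from_names short_name_from_names short_name_from_names_alt
  rw [pvAltGo_eq]
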